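-- pv_equiv track=rewrite | github.com/SESHASHAYANAN/Megalodon | backend/chunker.py | _extract_js_imports
-- ===== SOURCE A (Python) =====
-- def _extract_js_imports(content: str) -> str:
--     """Return the leading import block of a JS/TS file."""
--     lines = content.splitlines()
--     import_lines = []
--     in_imports = True
--     for line in lines[:60]:
--         stripped = line.strip()
--         if in_imports and (
--             stripped.startswith("import ")
--             or stripped.startswith("const ")
--             and "require(" in stripped
--             or stripped.startswith("//")
--             or stripped == ""
--         ):
--             import_lines.append(line)
--         else:
--             if import_lines:
--                 in_imports = False
--     return "\n".join(import_lines[:30])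
-- ===== SOURCE B (Python) =====
-- def _is_import_line(line: str) -> bool:
--     stripped = line.strip()
--     return (
--         stripped.startswith("import ")
--         or (stripped.startswith("const ") and "require(" in stripped)
--         or stripped.startswith("//")
--         or stripped == ""
--     )
--
--
-- def _extract_js_imports(content: str) -> str:
--     """Return the leading import block of a JS/TS file."""
--     head = content.splitlines()[:60]
--     # phase 1: drop leading non-import lines; phase 2: take the import-line prefix
--     start = 0
--     while start < len(head) and not _is_import_line(head[start]):
--         start += 1
--     stop = start
--     while stop < len(head) and _is_import_line(head[stop]):
--         stop += 1
--     return "\n".join(head[start:stop][:30])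
-- ===== Notes on version B (the rewrite author's own statement) =====
-- stated objective: simpler
-- what changed: Replaces A's in_imports boolean state machine over all 60 lines with two declarative phases: skip the leading non-import lines, then collect the consecutive import-line prefix.
import Mathlib
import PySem

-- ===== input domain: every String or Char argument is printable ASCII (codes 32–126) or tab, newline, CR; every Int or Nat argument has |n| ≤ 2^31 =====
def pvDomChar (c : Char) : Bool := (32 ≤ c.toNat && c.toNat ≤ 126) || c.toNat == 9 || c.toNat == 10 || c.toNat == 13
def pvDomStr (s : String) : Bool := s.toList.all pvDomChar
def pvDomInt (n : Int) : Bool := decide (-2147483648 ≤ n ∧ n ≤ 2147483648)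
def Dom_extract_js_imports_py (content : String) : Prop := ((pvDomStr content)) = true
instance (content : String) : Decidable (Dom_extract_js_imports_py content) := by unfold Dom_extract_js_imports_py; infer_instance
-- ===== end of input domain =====

-- B reorganises A's flag-driven single pass into two declarative phases (drop leading
-- non-import lines, then take the import-line prefix); objective: simpler, same cost.

-- ===== PORT A =====
def pvP (line : String) : Bool :=
  let stripped := PySem.Str.strip line
  PySem.Str.startswith stripped "import " ||
  (PySem.Str.startswith stripped "const " && PySem.Str.isIn "require(" stripped) ||
  PySem.Str.startswith stripped "//" ||
  (stripped == "")

def pvStepA (st : List String × Bool) (line : String) : List String × Bool :=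
  if st.2 && pvP line then (st.1 ++ [line], st.2)
  else (st.1, if st.1 ≠ [] then false else st.2)

def extract_js_imports_py (content : String) : String :=
  let lines := PySem.Str.splitlines content
  let r := (PySem.List.slice lines none (some 60)).foldl pvStepA ([], true)
  PySem.Str.join "\n" (PySem.List.slice r.1 none (some 30))

-- ===== PORT B =====
-- transcription of Source B's first while loop (advance past leading non-import lines)
def pvDropNonImport : List String → List String
  | [] => []
  | l :: t => if pvP l then l :: t else pvDropNonImport t

-- transcription of Source B's second while loop (collect the import-line prefix)
def pvTakeImport : List String → List String
  | [] => []
  | l :: t => if pvP l then l :: pvTakeImport t else []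

def extract_js_imports_py_alt (content : String) : String :=
  let head := PySem.List.slice (PySem.Str.splitlines content) none (some 60)
  let block := pvTakeImport (pvDropNonImport head)
  PySem.Str.join "\n" (PySem.List.slice block none (some 30))

-- ===== PRECONDITION & SPEC =====
def Spec_extract_js_imports_py (content : String) (out : String) : Prop := out = extract_js_imports_py_alt content
instance (content : String) (out : String) : Decidable (Spec_extract_js_imports_py content out) := by unfold Spec_extract_js_imports_py; infer_instance

-- ===== CLAIM (what is proved, stated in full; the proofs are below) =====
def Claim_equal_extract_js_imports_py : Prop := ∀ (content : String), Dom_extract_js_imports_py content → Spec_extract_js_imports_py content (extract_js_imports_py content)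

-- ===== LEMMAS AND PROOFS =====
lemma foldA_false (ls : List String) (acc : List String) :
    ls.foldl pvStepA (acc, false) = (acc, false) := by
  induction ls generalizing acc with
  | nil => rfl
  | cons l t ih =>
    simp only [List.foldl_cons, pvStepA]
    split_ifs <;> simp_all

lemma foldA_true_ne (ls : List String) (acc : List String) (h : acc ≠ []) :
    (ls.foldl pvStepA (acc, true)).1 = acc ++ pvTakeImport ls := by
  induction ls generalizing acc with
  | nil => simp [pvTakeImport]
  | cons l t ih =>
    simp only [List.foldl_cons, pvStepA, pvTakeImport]
    by_cases hp : pvP l = true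
    · simp only [hp, Bool.and_true, if_true]
      rw [ih (acc ++ [l]) (by simp)]
      simp
    · simp [hp, h, foldA_false]

lemma foldA_true_nil (ls : List String) :
    (ls.foldl pvStepA (([] : List String), true)).1 = pvTakeImport (pvDropNonImport ls) := by
  induction ls with
  | nil => rfl
  | cons l t ih =>
    simp only [List.foldl_cons, pvStepA, pvDropNonImport]
    by_cases hp : pvP l = true
    · simp only [hp, Bool.and_true, if_true, List.nil_append]
      rw [foldA_true_ne t [l] (by simp)]
      simp [pvTakeImport, hp]
    · simpa [hp] using ih

-- ===== VERDICT (by name: the statement is the Claim_ definition above) =====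
theorem extract_js_imports_py_spec : Claim_equal_extract_js_imports_py := by
  intro content _
  simp only [Spec_extract_js_imports_py, extract_js_imports_py, extract_js_imports_py_alt,
    foldA_true_nil]
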